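-- pv_equiv track=rewrite | github.com/v-a-c-u-u-m/neomorph | neomorph.py | ascii_check
-- ===== SOURCE A (Python) =====
-- def ascii_check(data):
--     ascii = ''
--     for i in data:
--         if 31 < i < 127:
--             ascii += chr(i)
--         else:
--             return None
--     return ascii
-- ===== SOURCE B (Python) =====
-- def ascii_check(data):
--     if all(31 < i < 127 for i in data):
--         return ''.join(chr(i) for i in data)
--     return None
-- ===== Notes on version B (the rewrite author's own statement) =====
-- stated objective: simpler
-- what changed: B replaces A's single short-circuiting loop that interleaves the range check with character accumulation by two separate passes: an all() validation pass, then a join pass building the string only when every code is in range.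
import Mathlib
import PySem

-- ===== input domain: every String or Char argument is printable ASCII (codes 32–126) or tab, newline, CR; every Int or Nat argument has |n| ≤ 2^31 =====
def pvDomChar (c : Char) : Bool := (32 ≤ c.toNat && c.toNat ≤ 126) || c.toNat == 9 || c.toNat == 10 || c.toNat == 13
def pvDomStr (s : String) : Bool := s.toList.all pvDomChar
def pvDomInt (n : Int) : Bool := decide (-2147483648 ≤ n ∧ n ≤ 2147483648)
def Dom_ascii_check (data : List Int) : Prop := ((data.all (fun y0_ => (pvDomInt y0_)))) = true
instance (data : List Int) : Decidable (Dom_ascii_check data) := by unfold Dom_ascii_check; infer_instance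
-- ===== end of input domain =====

-- B validates all codes in one pass, then builds the string in a second pass (simpler decomposition).

-- ===== PORT A =====
-- A: one loop, accumulating characters and returning None as soon as a code is out of range.
def ascii_check_go (data : List Int) (acc : List Char) : Option String :=
  match data with
  | [] => some (String.mk acc)
  | i :: rest =>
      if 31 < i ∧ i < 127 then ascii_check_go rest (acc ++ [Char.ofNat i.toNat])
      else none

def ascii_check (data : List Int) : Option String := ascii_check_go data []

-- ===== PORT B =====
def ascii_check_alt (data : List Int) : Option String :=
  if data.all (fun i => 31 < i && i < 127) then
    some (String.mk (data.map (fun i => Char.ofNat i.toNat)))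
  else none

-- ===== PRECONDITION & SPEC =====
def Spec_ascii_check (data : List Int) (out : Option String) : Prop := out = ascii_check_alt data
instance (data : List Int) (out : Option String) : Decidable (Spec_ascii_check data out) := by unfold Spec_ascii_check; infer_instance

-- ===== CLAIM (what is proved, stated in full; the proofs are below) =====
def Claim_equal_ascii_check : Prop := ∀ (data : List Int), Dom_ascii_check data → Spec_ascii_check data (ascii_check data)

-- ===== LEMMAS AND PROOFS =====
theorem ascii_check_go_eq (data : List Int) : ∀ (acc : List Char),
    ascii_check_go data acc =
      (if data.all (fun i => 31 < i && i < 127) then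
        some (String.mk (acc ++ data.map (fun i => Char.ofNat i.toNat)))
      else none) := by
  induction data with
  | nil => intro acc; simp [ascii_check_go]
  | cons i rest ih =>
      intro acc
      simp only [ascii_check_go, List.all_cons, List.map_cons]
      by_cases h : 31 < i ∧ i < 127
      · rw [if_pos h, ih]
        have hb : (31 < i && i < 127) = true := by simp [h.1, h.2]
        simp [hb]
      · rw [if_neg h]
        have hb : (31 < i && i < 127) = false := by
          rcases not_and_or.mp h with h1 | h1 <;> simp [h1]
        simp [hb]

-- ===== VERDICT (by name: the statement is the Claim_ definition above) =====
theorem ascii_check_spec : Claim_equal_ascii_check := by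
  intro data _
  unfold Spec_ascii_check ascii_check ascii_check_alt
  rw [ascii_check_go_eq]
  simp
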